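-- pv_equiv track=rewrite | github.com/reymond-group/PDGA-MAP4_AP | pdga/sequence.py | sanitize_methylation
-- ===== SOURCE A (Python) =====
-- def is_empty(seq):
--     if len(seq) == 0:
--         return True
--     if set(seq) <= set("X-"):
--         return True
--     else:
--         False
--
-- def sanitize_methylation(seq):
--     double_methyl_present = "--" in seq
--     while double_methyl_present:
--         seq = seq.replace('--', '-')
--         double_methyl_present = "--" in seq
--     seq = remove_methylation_before_proline(seq)
--     seq = remove_methylation_at_end_and_begining(seq)
--     return seq
--
-- def remove_methylation_before_proline(seq):
--     # not methylation before proline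
--     return seq.replace("-Z", "Z").replace("-z", "z").replace("-P", "P").replace("-p", "p")
--
-- def remove_methylation_at_end_and_begining(seq):
--     # no methylation when sequence ends
--     if not is_empty(seq):
--         if seq[-1] == "-":
--             seq = seq[:-1]
--     if not is_empty(seq):
--         if seq[0] == "-":
--             seq = seq[1:]
--     if not is_empty(seq):
--         if seq[0] == "X" and seq[1] == "-":
--             seq = seq[0] + seq[2:]
--     return seq
-- ===== SOURCE B (Python) =====
-- def sanitize_methylation(seq):
--     # Single O(n) scan: collapse each dash run to one dash and drop it when the
--     # next residue is Z/z/P/p, then apply the boundary trimming rules.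
--     out = []
--     i = 0
--     n = len(seq)
--     while i < n:
--         c = seq[i]
--         if c == '-':
--             j = i
--             while j < n and seq[j] == '-':
--                 j += 1
--             if not (j < n and seq[j] in 'ZzPp'):
--                 out.append('-')
--             i = j
--         else:
--             out.append(c)
--             i += 1
--     s = ''.join(out)
--     if s and not all(ch in 'X-' for ch in s):
--         if s[-1] == '-':
--             s = s[:-1]
--     if s and not all(ch in 'X-' for ch in s):
--         if s[0] == '-':
--             s = s[1:]
--     if s and not all(ch in 'X-' for ch in s):
--         if s[0] == 'X' and s[1] == '-':
--             s = s[0] + s[2:]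
--     return s
-- ===== Notes on version B (the rewrite author's own statement) =====
-- stated objective: alternative
-- what changed: Replaces the fixpoint while-loop of pairwise dash replacement plus four chained .replace calls by a single left-to-right scan that collapses each maximal dash run and drops it when the next residue is Z/z/P/p, keeping the same boundary trimming.
import Mathlib
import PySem

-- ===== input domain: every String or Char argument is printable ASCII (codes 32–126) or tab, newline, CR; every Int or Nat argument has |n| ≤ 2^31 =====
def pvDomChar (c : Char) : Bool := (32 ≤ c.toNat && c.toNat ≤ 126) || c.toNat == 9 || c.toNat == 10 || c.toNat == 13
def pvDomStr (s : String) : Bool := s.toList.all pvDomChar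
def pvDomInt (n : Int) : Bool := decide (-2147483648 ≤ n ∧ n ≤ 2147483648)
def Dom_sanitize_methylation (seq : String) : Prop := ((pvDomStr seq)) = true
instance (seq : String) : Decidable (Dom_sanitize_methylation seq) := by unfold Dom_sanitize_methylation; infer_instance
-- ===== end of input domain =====

-- B replaces A's fixpoint while-loop of replace('--','-') plus four chained .replace calls
-- by one left-to-right scan (alternative algorithm, same return value; no speed claim).

-- ===== PORT A =====
-- Helper needed only to justify termination of A's while-loop (the loop shortens the
-- string): a reference recursion for two-character .replace, bridged to PySem.Chars.replace.
def pvRepl2 (a b : Char) (new : List Char) : List Char → List Char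
  | [] => []
  | [c] => [c]
  | c :: d :: t =>
    if c = a ∧ d = b then new ++ pvRepl2 a b new t
    else c :: pvRepl2 a b new (d :: t)

theorem pvGo_eq (a b : Char) (new : List Char) :
    ∀ (fuel : Nat) (l acc : List Char), l.length ≤ fuel →
      PySem.Chars.replace.go [a, b] new fuel l acc = acc.reverse ++ pvRepl2 a b new l := by
  intro fuel
  induction fuel with
  | zero =>
    intro l acc h
    have : l = [] := List.eq_nil_of_length_eq_zero (Nat.le_zero.mp h)
    subst this
    simp [PySem.Chars.replace.go, pvRepl2]
  | succ n ih =>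
    intro l acc h
    match l with
    | [] => simp [PySem.Chars.replace.go, pvRepl2]
    | [c] =>
      rw [PySem.Chars.replace.go]
      have hpre : [a, b].isPrefixOf [c] = false := by
        simp [List.isPrefixOf]
      simp [hpre, pvRepl2]
      rw [ih [] (c :: acc) (by simp)]
      simp [pvRepl2]
    | c :: d :: t =>
      rw [PySem.Chars.replace.go]
      by_cases hcd : c = a ∧ d = b
      · obtain ⟨rfl, rfl⟩ := hcd
        have hpre : [c, d].isPrefixOf (c :: d :: t) = true := by simp [List.isPrefixOf]
        simp only [hpre, if_pos, List.length_cons, List.length_nil, List.drop_succ_cons,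
          List.drop_zero]
        rw [ih t (new.reverse ++ acc) (by simpa using Nat.le_of_succ_le_succ (Nat.le_of_succ_le h))]
        simp [pvRepl2]
      · have hpre : [a, b].isPrefixOf (c :: d :: t) = false := by
          simp [List.isPrefixOf]
          intro h1 h2; exact absurd ⟨h1.symm, h2.symm⟩ hcd
        simp only [hpre]
        rw [ih (d :: t) (c :: acc) (by simpa using Nat.le_of_succ_le_succ h)]
        simp [pvRepl2, hcd]

theorem pvReplace_eq (a b : Char) (new l : List Char) :
    PySem.Chars.replace l [a, b] new = pvRepl2 a b new l := by
  rw [PySem.Chars.replace, if_neg (by simp)]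
  simpa using pvGo_eq a b new l.length l [] (le_refl _)

theorem pvRepl2_len_le (a b e : Char) (l : List Char) :
    (pvRepl2 a b [e] l).length ≤ l.length := by
  induction l using pvRepl2.induct a b with
  | case1 => simp [pvRepl2]
  | case2 c => simp [pvRepl2]
  | case3 c d t h ih => simp only [pvRepl2, if_pos h]; simp; omega
  | case4 c d t h ih => simp only [pvRepl2, if_neg h]; simp at ih ⊢; omega

theorem pvRepl2_len_lt (a b e : Char) (l : List Char) (h : [a, b] <:+: l) :
    (pvRepl2 a b [e] l).length < l.length := by
  induction l using pvRepl2.induct a b with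
  | case1 => exact absurd h.length_le (by simp)
  | case2 c => exact absurd h.length_le (by simp)
  | case3 c d t hm ih =>
    simp only [pvRepl2, if_pos hm]
    have := pvRepl2_len_le a b e t
    simp; omega
  | case4 c d t hm ih =>
    simp only [pvRepl2, if_neg hm]
    have hin : [a, b] <:+: d :: t := by
      rcases List.infix_cons_iff.mp h with hp | hi
      · exfalso
        rcases hp with ⟨r, hr⟩
        simp at hr
        exact hm ⟨hr.1.symm, hr.2.1.symm⟩
      · exact hi
    have := ih hin
    simp at this ⊢; omega

theorem pvCollapse_dec (s : String) (h : PySem.Str.isIn "--" s = true) :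
    (PySem.Str.replace s "--" "-").toList.length < s.toList.length := by
  have hin : ("--".toList) <:+: s.toList := (PySem.Str.isIn_iff_infix _ _).mp h
  have : "--".toList = ['-', '-'] := rfl
  rw [this] at hin
  show (String.ofList (PySem.Chars.replace s.toList "--".toList "-".toList)).toList.length < _
  rw [String.toList_ofList]
  show (PySem.Chars.replace s.toList ['-', '-'] ['-']).length < _
  rw [pvReplace_eq]
  exact pvRepl2_len_lt '-' '-' '-' s.toList hin

-- is_empty (Python returns True / True / None; None is falsy, ported as false)
def pvIsEmpty (s : String) : Bool :=
  if PySem.Str.len s = 0 then true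
  else PySem.Set.issubset (PySem.Set.ofList s.toList) (PySem.Set.ofList "X-".toList)

-- remove_methylation_at_end_and_begining (seq[0] is known to be 'X' in the third
-- branch's guard, so seq[0] + seq[2:] is ported as 'X' :: seq[2:])
def pvTrimEnds (s : String) : String :=
  let s1 := if pvIsEmpty s = false ∧ PySem.Str.pyGet? s (-1) = some '-'
            then PySem.Str.slice s none (some (-1)) else s
  let s2 := if pvIsEmpty s1 = false ∧ PySem.Str.pyGet? s1 0 = some '-'
            then PySem.Str.slice s1 (some 1) none else s1
  if pvIsEmpty s2 = false ∧ PySem.Str.pyGet? s2 0 = some 'X' ∧ PySem.Str.pyGet? s2 1 = some '-'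
  then String.ofList ('X' :: (PySem.Str.slice s2 (some 2) none).toList) else s2

-- remove_methylation_before_proline
def pvProline (s : String) : String :=
  PySem.Str.replace (PySem.Str.replace (PySem.Str.replace
    (PySem.Str.replace s "-Z" "Z") "-z" "z") "-P" "P") "-p" "p"

-- the while-loop: replace '--' by '-' until no '--' remains
def pvCollapse (s : String) : String :=
  if h : PySem.Str.isIn "--" s = true then pvCollapse (PySem.Str.replace s "--" "-") else s
termination_by s.toList.length
decreasing_by exact pvCollapse_dec s h

def sanitize_methylation (seq : String) : String :=
  pvTrimEnds (pvProline (pvCollapse seq))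

-- ===== PORT B =====
-- one pass: a maximal dash run is dropped before Z/z/P/p, otherwise becomes a single '-'
def pvScan : List Char → List Char
  | [] => []
  | c :: t =>
    if c = '-' then
      match hdw : t.dropWhile (· == '-') with
      | [] => ['-']
      | d :: r => if d = 'Z' ∨ d = 'z' ∨ d = 'P' ∨ d = 'p'
                  then pvScan (d :: r) else '-' :: pvScan (d :: r)
    else c :: pvScan t
termination_by l => l.length
decreasing_by
  · have h1 : (t.dropWhile (· == '-')).length ≤ t.length := t.length_dropWhile_le _
    rw [hdw] at h1; simp at h1 ⊢; omega
  · have h1 : (t.dropWhile (· == '-')).length ≤ t.length := t.length_dropWhile_le _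
    rw [hdw] at h1; simp at h1 ⊢; omega
  · simp

-- all(ch in 'X-' for ch in s)
def pvAllXDash (s : String) : Bool := s.toList.all (fun c => PySem.Str.isIn (String.ofList [c]) "X-")

def sanitize_methylation_alt (seq : String) : String :=
  let s0 := String.ofList (pvScan seq.toList)
  let s1 := if s0 ≠ "" ∧ pvAllXDash s0 = false ∧ PySem.Str.pyGet? s0 (-1) = some '-'
            then PySem.Str.slice s0 none (some (-1)) else s0
  let s2 := if s1 ≠ "" ∧ pvAllXDash s1 = false ∧ PySem.Str.pyGet? s1 0 = some '-'
            then PySem.Str.slice s1 (some 1) none else s1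
  if s2 ≠ "" ∧ pvAllXDash s2 = false ∧ PySem.Str.pyGet? s2 0 = some 'X' ∧ PySem.Str.pyGet? s2 1 = some '-'
  then String.ofList ('X' :: (PySem.Str.slice s2 (some 2) none).toList) else s2

-- ===== PRECONDITION & SPEC =====
def Spec_sanitize_methylation (seq : String) (out : String) : Prop := out = sanitize_methylation_alt seq
instance (seq : String) (out : String) : Decidable (Spec_sanitize_methylation seq out) := by unfold Spec_sanitize_methylation; infer_instance

-- ===== CLAIM (what is proved, stated in full; the proofs are below) =====
def Claim_equal_sanitize_methylation : Prop := ∀ (seq : String), Dom_sanitize_methylation seq → Spec_sanitize_methylation seq (sanitize_methylation seq)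

-- ===== LEMMAS AND PROOFS =====

-- run-collapsing normal form of A's while-loop
def pvCol : List Char → List Char
  | [] => []
  | c :: t =>
    if c = '-' then '-' :: pvCol (t.dropWhile (· == '-'))
    else c :: pvCol t
termination_by l => l.length
decreasing_by
  · have h1 : (t.dropWhile (· == '-')).length ≤ t.length := t.length_dropWhile_le _
    simp; omega
  · simp

-- fused demethylation on dash-isolated strings
def pvDem : List Char → List Char
  | [] => []
  | [c] => [c]
  | c :: d :: t =>
    if c = '-' then
      if d = 'Z' ∨ d = 'z' ∨ d = 'P' ∨ d = 'p' then d :: pvDem t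
      else '-' :: d :: pvDem t
    else c :: pvDem (d :: t)
termination_by l => l.length


theorem pvRepl2_cons_ne (a b : Char) (new : List Char) (c : Char) (t : List Char) (h : c ≠ a) :
    pvRepl2 a b new (c :: t) = c :: pvRepl2 a b new t := by
  cases t with
  | nil => simp [pvRepl2]
  | cons d t' => rw [pvRepl2, if_neg (fun hh => h hh.1)]

theorem pvRepl2_match (a b : Char) (new t : List Char) :
    pvRepl2 a b new (a :: b :: t) = new ++ pvRepl2 a b new t := by
  simp [pvRepl2]

theorem pvRepl2_ne2 (a b : Char) (new : List Char) (c d : Char) (t : List Char) (h : d ≠ b) :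
    pvRepl2 a b new (c :: d :: t) = c :: pvRepl2 a b new (d :: t) := by
  rw [pvRepl2, if_neg (fun hh => h hh.2)]

theorem pvDropWhile_head (p : Char → Bool) (t : List Char) (d : Char) (r : List Char)
    (h : t.dropWhile p = d :: r) : p d = false := by
  induction t with
  | nil => simp at h
  | cons c t' ih =>
    rw [List.dropWhile_cons] at h
    by_cases hc : p c = true
    · rw [if_pos hc] at h; exact ih h
    · rw [if_neg hc] at h
      cases h; simpa using hc

theorem pvCol_nil : pvCol [] = [] := by rw [pvCol]

theorem pvCol_dash (t : List Char) : pvCol ('-' :: t) = '-' :: pvCol (t.dropWhile (· == '-')) := by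
  rw [pvCol]; simp

theorem pvCol_cons_ne (c : Char) (t : List Char) (h : c ≠ '-') :
    pvCol (c :: t) = c :: pvCol t := by
  rw [pvCol]; rw [if_neg h]

theorem pvDropWhile_repl (l : List Char) :
    (pvRepl2 '-' '-' ['-'] l).dropWhile (· == '-') =
      pvRepl2 '-' '-' ['-'] (l.dropWhile (· == '-')) := by
  induction l using pvRepl2.induct '-' '-' with
  | case1 => simp [pvRepl2]
  | case2 c =>
    by_cases hc : c = '-'
    · subst hc; simp [pvRepl2]
    · have hcf : (c == '-') = false := by simpa using hc
      simp [pvRepl2, hcf]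
  | case3 c d t hm ih =>
    obtain ⟨rfl, rfl⟩ := hm
    rw [pvRepl2_match]
    simp only [List.cons_append, List.nil_append, List.dropWhile_cons,
      show (('-' : Char) == '-') = true from rfl, if_true]
    exact ih
  | case4 c d t hm ih =>
    by_cases hc : c = '-'
    · subst hc
      have hd : d ≠ '-' := fun hd => hm ⟨rfl, hd⟩
      have hdf : (d == '-') = false := by simpa using hd
      rw [pvRepl2_ne2 _ _ _ _ _ _ hd]
      simp only [List.dropWhile_cons, show (('-' : Char) == '-') = true from rfl, if_true, hdf,
        Bool.false_eq_true, if_false]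
      rw [ih]
      simp [hdf]
    · have hcf : (c == '-') = false := by simpa using hc
      rw [pvRepl2_cons_ne _ _ _ _ _ hc]
      simp only [List.dropWhile_cons, hcf, Bool.false_eq_true, if_false]
      rw [pvRepl2_cons_ne _ _ _ _ _ hc]

theorem pvCol_repl (l : List Char) : pvCol (pvRepl2 '-' '-' ['-'] l) = pvCol l := by
  match l with
  | [] => simp [pvRepl2]
  | [c] => simp [pvRepl2]
  | c :: d :: t =>
    by_cases hc : c = '-'
    · subst hc
      by_cases hd : d = '-'
      · subst hd
        rw [pvRepl2_match]
        simp only [List.cons_append, List.nil_append]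
        rw [pvCol_dash, pvCol_dash]
        rw [pvDropWhile_repl]
        rw [pvCol_repl (t.dropWhile (· == '-'))]
        simp
      · have hdf : (d == '-') = false := by simpa using hd
        rw [pvRepl2_ne2 _ _ _ _ _ _ hd, pvRepl2_cons_ne _ _ _ _ _ hd]
        rw [pvCol_dash, pvCol_dash]
        simp only [List.dropWhile_cons, hdf, Bool.false_eq_true, if_false]
        rw [pvCol_cons_ne _ _ hd, pvCol_cons_ne _ _ hd]
        rw [pvCol_repl t]
    · rw [pvRepl2_cons_ne _ _ _ _ _ hc]
      rw [pvCol_cons_ne _ _ hc, pvCol_cons_ne _ _ hc]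
      rw [pvCol_repl (d :: t)]
termination_by l.length
decreasing_by
  · have := t.length_dropWhile_le (· == '-'); simp; omega
  · simp
  · simp

theorem pvCol_of_nodd (l : List Char) (h : ¬ ['-', '-'] <:+: l) : pvCol l = l := by
  match l with
  | [] => exact pvCol_nil
  | c :: t =>
    by_cases hc : c = '-'
    · subst hc
      have hdw : t.dropWhile (· == '-') = t := by
        cases t with
        | nil => rfl
        | cons d t' =>
          have hd : d ≠ '-' := by rintro rfl; exact h ⟨[], t', rfl⟩
          simp [show (d == '-') = false from by simpa using hd]
      rw [pvCol_dash, hdw]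
      rw [pvCol_of_nodd t (fun hi => h (List.infix_cons hi))]
    · rw [pvCol_cons_ne _ _ hc]
      rw [pvCol_of_nodd t (fun hi => h (List.infix_cons hi))]
termination_by l.length
decreasing_by
  · simp
  · simp

theorem pvNodd_pvCol (l : List Char) : ¬ ['-', '-'] <:+: pvCol l := by
  match l with
  | [] => rw [pvCol_nil]; intro h; simpa using h.length_le
  | c :: t =>
    by_cases hc : c = '-'
    · subst hc
      rw [pvCol_dash]
      intro h
      rcases List.infix_cons_iff.mp h with hp | hi
      · match hu : t.dropWhile (· == '-') with
        | [] =>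
          rw [hu, pvCol_nil] at hp
          rcases hp with ⟨r, hr⟩; simp at hr
        | d :: r =>
          have hd : d ≠ '-' := by
            have := pvDropWhile_head _ _ _ _ hu; simpa using this
          rw [hu, pvCol_cons_ne _ _ hd] at hp
          rcases hp with ⟨w, hw⟩
          simp at hw
          exact hd (by tauto)
      · exact pvNodd_pvCol (t.dropWhile (· == '-')) hi
    · rw [pvCol_cons_ne _ _ hc]
      intro h
      rcases List.infix_cons_iff.mp h with hp | hi
      · rcases hp with ⟨w, hw⟩
        simp at hw
        exact hc (by tauto)
      · exact pvNodd_pvCol t hi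
termination_by l.length
decreasing_by
  · have := t.length_dropWhile_le (· == '-'); simp; omega
  · simp

theorem pvStrReplace_toList (s old new : String) (a b e : Char)
    (h1 : old.toList = [a, b]) (h2 : new.toList = [e]) :
    (PySem.Str.replace s old new).toList = pvRepl2 a b [e] s.toList := by
  show (String.ofList (PySem.Chars.replace s.toList old.toList new.toList)).toList = _
  rw [h1, h2, String.toList_ofList, pvReplace_eq]

theorem pvCollapse_toList (s : String) : (pvCollapse s).toList = pvCol s.toList := by
  rw [pvCollapse]
  split
  · next h =>
    rw [pvCollapse_toList (PySem.Str.replace s "--" "-")]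
    rw [pvStrReplace_toList s "--" "-" '-' '-' '-' rfl rfl]
    exact pvCol_repl s.toList
  · next h =>
    have : ¬ ['-', '-'] <:+: s.toList := by
      intro hi
      exact h ((PySem.Str.isIn_iff_infix _ _).mpr hi)
    exact (pvCol_of_nodd s.toList this).symm
termination_by s.toList.length
decreasing_by exact pvCollapse_dec s (by assumption)

theorem pvDem_nil : pvDem [] = [] := by rw [pvDem]

theorem pvDem_single (c : Char) : pvDem [c] = [c] := by rw [pvDem]

theorem pvDem_cons_ne (c : Char) (m : List Char) (h : c ≠ '-') :
    pvDem (c :: m) = c :: pvDem m := by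
  cases m with
  | nil => rw [pvDem_single, pvDem_nil]
  | cons d r => rw [pvDem, if_neg h]

theorem pvDem_dash (d : Char) (t : List Char) :
    pvDem ('-' :: d :: t) =
      if d = 'Z' ∨ d = 'z' ∨ d = 'P' ∨ d = 'p' then d :: pvDem t
      else '-' :: d :: pvDem t := by
  rw [pvDem, if_pos rfl]

theorem pvChain_eq_pvDem (l : List Char) (h : ¬ ['-', '-'] <:+: l) :
    pvRepl2 '-' 'p' ['p'] (pvRepl2 '-' 'P' ['P'] (pvRepl2 '-' 'z' ['z']
      (pvRepl2 '-' 'Z' ['Z'] l))) = pvDem l := by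
  match l with
  | [] => simp [pvRepl2, pvDem_nil]
  | [c] => simp [pvRepl2, pvDem_single]
  | c :: d :: t =>
    have hdt : ¬ ['-', '-'] <:+: (d :: t) := fun hi => h (List.infix_cons hi)
    have ht : ¬ ['-', '-'] <:+: t := fun hi => hdt (List.infix_cons hi)
    by_cases hc : c = '-'
    · subst hc
      have hd : d ≠ '-' := by rintro rfl; exact h ⟨[], t, rfl⟩
      by_cases hZ : d = 'Z'
      · subst hZ
        rw [pvRepl2_match]
        simp only [List.cons_append, List.nil_append]
        rw [pvRepl2_cons_ne _ _ _ _ _ (by decide : ('Z' : Char) ≠ '-'),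
            pvRepl2_cons_ne _ _ _ _ _ (by decide : ('Z' : Char) ≠ '-'),
            pvRepl2_cons_ne _ _ _ _ _ (by decide : ('Z' : Char) ≠ '-')]
        rw [pvChain_eq_pvDem t ht, pvDem_dash]
        simp
      · by_cases hz : d = 'z'
        · subst hz
          rw [pvRepl2_ne2 _ _ _ _ _ _ (by decide : ('z' : Char) ≠ 'Z'),
              pvRepl2_cons_ne _ _ _ _ _ (by decide : ('z' : Char) ≠ '-')]
          rw [pvRepl2_match]
          simp only [List.cons_append, List.nil_append]
          rw [pvRepl2_cons_ne _ _ _ _ _ (by decide : ('z' : Char) ≠ '-'),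
              pvRepl2_cons_ne _ _ _ _ _ (by decide : ('z' : Char) ≠ '-')]
          rw [pvChain_eq_pvDem t ht, pvDem_dash]
          simp
        · by_cases hP : d = 'P'
          · subst hP
            rw [pvRepl2_ne2 _ _ _ _ _ _ (by decide : ('P' : Char) ≠ 'Z'),
                pvRepl2_cons_ne _ _ _ _ _ (by decide : ('P' : Char) ≠ '-'),
                pvRepl2_ne2 _ _ _ _ _ _ (by decide : ('P' : Char) ≠ 'z'),
                pvRepl2_cons_ne _ _ _ _ _ (by decide : ('P' : Char) ≠ '-')]
            rw [pvRepl2_match]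
            simp only [List.cons_append, List.nil_append]
            rw [pvRepl2_cons_ne _ _ _ _ _ (by decide : ('P' : Char) ≠ '-')]
            rw [pvChain_eq_pvDem t ht, pvDem_dash]
            simp
          · by_cases hp : d = 'p'
            · subst hp
              rw [pvRepl2_ne2 _ _ _ _ _ _ (by decide : ('p' : Char) ≠ 'Z'),
                  pvRepl2_cons_ne _ _ _ _ _ (by decide : ('p' : Char) ≠ '-'),
                  pvRepl2_ne2 _ _ _ _ _ _ (by decide : ('p' : Char) ≠ 'z'),
                  pvRepl2_cons_ne _ _ _ _ _ (by decide : ('p' : Char) ≠ '-'),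
                  pvRepl2_ne2 _ _ _ _ _ _ (by decide : ('p' : Char) ≠ 'P'),
                  pvRepl2_cons_ne _ _ _ _ _ (by decide : ('p' : Char) ≠ '-')]
              rw [pvRepl2_match]
              simp only [List.cons_append, List.nil_append]
              rw [pvChain_eq_pvDem t ht, pvDem_dash]
              simp
            · rw [pvRepl2_ne2 _ _ _ _ _ _ hZ, pvRepl2_cons_ne _ _ _ _ _ hd,
                  pvRepl2_ne2 _ _ _ _ _ _ hz, pvRepl2_cons_ne _ _ _ _ _ hd,
                  pvRepl2_ne2 _ _ _ _ _ _ hP, pvRepl2_cons_ne _ _ _ _ _ hd,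
                  pvRepl2_ne2 _ _ _ _ _ _ hp, pvRepl2_cons_ne _ _ _ _ _ hd]
              rw [pvChain_eq_pvDem t ht, pvDem_dash]
              simp [hZ, hz, hP, hp]
    · rw [pvRepl2_cons_ne _ _ _ _ _ hc, pvRepl2_cons_ne _ _ _ _ _ hc,
          pvRepl2_cons_ne _ _ _ _ _ hc, pvRepl2_cons_ne _ _ _ _ _ hc]
      rw [pvChain_eq_pvDem (d :: t) hdt, pvDem_cons_ne _ _ hc]
termination_by l.length

theorem pvScan_eq (l : List Char) : pvScan l = pvDem (pvCol l) := by
  match l with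
  | [] => rw [pvScan, pvCol_nil, pvDem_nil]
  | c :: t =>
    by_cases hc : c = '-'
    · subst hc
      rw [pvScan, if_pos rfl]
      split
      · next heq =>
        rw [pvCol_dash, heq, pvCol_nil, pvDem_single]
      · next d r heq =>
        have hd : d ≠ '-' := by
          have := pvDropWhile_head _ _ _ _ heq; simpa using this
        have hrec : pvScan (d :: r) = pvDem (pvCol (d :: r)) := pvScan_eq (d :: r)
        rw [pvCol_dash, heq, pvCol_cons_ne _ _ hd, pvDem_dash]
        by_cases hset : d = 'Z' ∨ d = 'z' ∨ d = 'P' ∨ d = 'p'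
        · rw [if_pos hset, if_pos hset, hrec, pvCol_cons_ne _ _ hd, pvDem_cons_ne _ _ hd]
        · rw [if_neg hset, if_neg hset, hrec, pvCol_cons_ne _ _ hd, pvDem_cons_ne _ _ hd]
    · rw [pvScan]
      rw [if_neg hc]
      rw [pvScan_eq t, pvCol_cons_ne _ _ hc, pvDem_cons_ne _ _ hc]
termination_by l.length
decreasing_by
  · rename_i heq'
    have h1 : (t.dropWhile (· == '-')).length ≤ t.length := t.length_dropWhile_le _
    rw [heq'] at h1; simp at h1 ⊢; omega
  · simp

theorem pvSingleton_infix (x : Char) (l : List Char) : [x] <:+: l ↔ x ∈ l := by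
  constructor
  · intro h; exact h.mem (List.mem_singleton_self x)
  · intro h
    obtain ⟨u, v, rfl⟩ := List.append_of_mem h
    exact ⟨u, v, by simp⟩

theorem pvMemXDash (c : Char) :
    PySem.Str.isIn (String.ofList [c]) "X-" = true ↔ (c = 'X' ∨ c = '-') := by
  rw [PySem.Str.isIn_iff_infix, String.toList_ofList]
  rw [show ("X-".toList) = ['X', '-'] from rfl, pvSingleton_infix]
  simp

theorem pvAllXDash_iff (s : String) :
    pvAllXDash s = true ↔ ∀ c ∈ s.toList, c = 'X' ∨ c = '-' := by
  unfold pvAllXDash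
  rw [List.all_eq_true]
  constructor
  · intro h c hc; exact (pvMemXDash c).mp (h c hc)
  · intro h c hc; exact (pvMemXDash c).mpr (h c hc)

theorem pvIsEmpty_false_iff (s : String) :
    pvIsEmpty s = false ↔ (s ≠ "" ∧ pvAllXDash s = false) := by
  unfold pvIsEmpty
  by_cases h0 : PySem.Str.len s = 0
  · have hs : s = "" := by
      have := PySem.Str.len_eq s
      rw [h0] at this
      have h2 : s.toList = [] := List.eq_nil_of_length_eq_zero (by omega)
      rw [← String.ofList_toList (s := s), h2]
    rw [if_pos h0]
    simp [hs]
  · have hne : s ≠ "" := by rintro rfl; exact h0 rfl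
    rw [if_neg h0]
    have hsub : PySem.Set.issubset (PySem.Set.ofList s.toList) (PySem.Set.ofList "X-".toList) = true
        ↔ ∀ c ∈ s.toList, c = 'X' ∨ c = '-' := by
      rw [PySem.Set.issubset_iff]
      constructor
      · intro h c hc
        have := h c ((PySem.Set.mem_ofList _ _).mpr hc)
        rw [PySem.Set.mem_ofList] at this
        simpa using this
      · intro h c hc
        rw [PySem.Set.mem_ofList] at hc
        rw [PySem.Set.mem_ofList]
        simpa using h c hc
    constructor
    · intro h
      refine ⟨hne, ?_⟩
      cases hb : pvAllXDash s with
      | false => rfl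
      | true =>
        have hx := hsub.mpr ((pvAllXDash_iff s).mp hb)
        rw [h] at hx; cases hx
    · rintro ⟨-, h⟩
      cases hb : PySem.Set.issubset (PySem.Set.ofList s.toList) (PySem.Set.ofList "X-".toList) with
      | false => rfl
      | true =>
        have hx := (pvAllXDash_iff s).mpr (hsub.mp hb)
        rw [h] at hx; cases hx

theorem pvTrim_eq (s : String) :
    pvTrimEnds s =
      (let s1 := if s ≠ "" ∧ pvAllXDash s = false ∧ PySem.Str.pyGet? s (-1) = some '-'
                 then PySem.Str.slice s none (some (-1)) else s
       let s2 := if s1 ≠ "" ∧ pvAllXDash s1 = false ∧ PySem.Str.pyGet? s1 0 = some '-'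
                 then PySem.Str.slice s1 (some 1) none else s1
       if s2 ≠ "" ∧ pvAllXDash s2 = false ∧ PySem.Str.pyGet? s2 0 = some 'X' ∧ PySem.Str.pyGet? s2 1 = some '-'
       then String.ofList ('X' :: (PySem.Str.slice s2 (some 2) none).toList) else s2) := by
  unfold pvTrimEnds
  simp only [pvIsEmpty_false_iff, and_assoc]

theorem pvMiddle_eq (seq : String) :
    pvProline (pvCollapse seq) = String.ofList (pvScan seq.toList) := by
  have hL : (pvProline (pvCollapse seq)).toList = pvScan seq.toList := by
    unfold pvProline
    rw [pvStrReplace_toList _ "-p" "p" '-' 'p' 'p' rfl rfl,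
        pvStrReplace_toList _ "-P" "P" '-' 'P' 'P' rfl rfl,
        pvStrReplace_toList _ "-z" "z" '-' 'z' 'z' rfl rfl,
        pvStrReplace_toList _ "-Z" "Z" '-' 'Z' 'Z' rfl rfl]
    rw [pvCollapse_toList]
    rw [pvChain_eq_pvDem _ (pvNodd_pvCol _)]
    exact (pvScan_eq _).symm
  rw [← String.ofList_toList (s := pvProline (pvCollapse seq)), hL]

-- ===== VERDICT (by name: the statement is the Claim_ definition above) =====
theorem sanitize_methylation_spec : Claim_equal_sanitize_methylation := by
  intro seq _
  unfold Spec_sanitize_methylation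
  show sanitize_methylation seq = sanitize_methylation_alt seq
  unfold sanitize_methylation sanitize_methylation_alt
  rw [pvMiddle_eq, pvTrim_eq]
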